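-- pv_equiv track=rewrite | github.com/ZetsubouCode/BatchBench | utils/parse.py | parse_line_list
-- ===== SOURCE A (Python) =====
-- from typing import Any, List, Optional
--
-- def _chunks(raw: Any) -> List[str]:
--     if raw is None:
--         return []
--     if isinstance(raw, list):
--         return [str(x) for x in raw]
--     return [str(raw)]
--
-- def parse_line_list(raw: Any, dedupe: bool = False) -> List[str]:
--     out: List[str] = []
--     seen = set()
--     for chunk in _chunks(raw):
--         for line in chunk.replace("\r", "\n").split("\n"):
--             value = line.strip()
--             if not value:
--                 continue
--             if dedupe:
--                 if value in seen:
--                     continue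
--                 seen.add(value)
--             out.append(value)
--     return out
-- ===== SOURCE B (Python) =====
-- from typing import Any, List
--
-- def _chunks(raw: Any) -> List[str]:
--     if raw is None:
--         return []
--     if isinstance(raw, list):
--         return [str(x) for x in raw]
--     return [str(raw)]
--
-- def parse_line_list(raw: Any, dedupe: bool = False) -> List[str]:
--     # phase 1: per-chunk value lists, then flatten
--     pieces = [
--         [v for v in (line.strip() for line in chunk.replace("\r", "\n").split("\n")) if v]
--         for chunk in _chunks(raw)
--     ]
--     vals = [v for piece in pieces for v in piece]
--     if not dedupe or not vals:
--         return vals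
--     # phase 2: sort-based dedupe — order index positions by (value, position); the head of
--     # each equal-value block is that value's first occurrence; restore positional order.
--     order = sorted(range(len(vals)), key=lambda i: (vals[i], i))
--     keep = [order[0]] + [j for i, j in zip(order, order[1:]) if vals[i] != vals[j]]
--     return [vals[i] for i in sorted(keep)]
-- ===== Notes on version B (the rewrite author's own statement) =====
-- stated objective: alternative
-- what changed: B stages the work: it first builds the per-chunk value lists and flattens them with no dedupe logic, then dedupes by a sort-based pass - order the index positions by (value, position), keep the head of each equal-value block (that value's first position), and read the kept positions back in index order - instead of A's interleaved seen-set bookkeeping.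
import Mathlib
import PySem

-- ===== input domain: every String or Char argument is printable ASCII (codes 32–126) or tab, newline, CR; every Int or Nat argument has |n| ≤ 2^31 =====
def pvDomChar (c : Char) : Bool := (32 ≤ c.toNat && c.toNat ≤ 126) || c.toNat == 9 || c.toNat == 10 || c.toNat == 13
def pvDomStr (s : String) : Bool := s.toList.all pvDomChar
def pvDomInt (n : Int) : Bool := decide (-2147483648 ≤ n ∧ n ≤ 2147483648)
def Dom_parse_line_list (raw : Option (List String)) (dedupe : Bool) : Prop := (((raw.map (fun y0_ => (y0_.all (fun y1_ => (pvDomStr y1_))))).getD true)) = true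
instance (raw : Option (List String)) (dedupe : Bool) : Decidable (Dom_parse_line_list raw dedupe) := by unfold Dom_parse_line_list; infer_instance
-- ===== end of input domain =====

-- B gathers per-chunk value lists and flattens them in one phase, then (when asked) dedupes by a
-- sort-based pass (order positions by (value, position), keep each value block's head, restore
-- positional order) instead of A's interleaved seen-set; same return value.

-- ===== PORT A =====
-- _chunks: raw is Option (List String), so str(x) is the identity
def pvChunks (raw : Option (List String)) : List String :=
  match raw with
  | none => []
  | some xs => xs.map (fun x => x)

-- A: nested loops appending to out with an interleaved seen-set when dedupe
def parse_line_list (raw : Option (List String)) (dedupe : Bool) : List String :=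
  (((pvChunks raw).foldl (fun (st : List String × PySem.Set String) chunk =>
      (((PySem.Str.split? (PySem.Str.replace chunk "\r" "\n") "\n").getD [])).foldl
        (fun (st : List String × PySem.Set String) line =>
          let value := PySem.Str.strip line
          if value = "" then st
          else if dedupe then
            if PySem.Set.contains st.2 value then st
            else (st.1 ++ [value], PySem.Set.add st.2 value)
          else (st.1 ++ [value], st.2)) st)
      ([], PySem.Set.empty))).1

-- ===== PORT B =====
-- per-chunk: map strip over the split lines, keep non-empties
def pvVals (chunk : String) : List String :=
  (((PySem.Str.split? (PySem.Str.replace chunk "\r" "\n") "\n").getD []).map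
    PySem.Str.strip).filter (fun v => v ≠ "")

-- B: pieces-then-flatten; when dedupe, sort index positions by (value, position), keep the head
-- of each equal-value block (= the value's first position), and read them back in index order
def parse_line_list_alt (raw : Option (List String)) (dedupe : Bool) : List String :=
  let pieces := (pvChunks raw).map pvVals
  let vals := pieces.flatMap (fun p => p)
  if dedupe = false ∨ vals = [] then vals
  else
    let order := PySem.List.sorted2 (PySem.List.pyRange 0 (vals.length : Int) 1)
        (fun i => PySem.List.pyGetD vals i "") (fun i => i) false
    match order with
    | [] => []  -- unreachable: order is a permutation of a nonempty range
    | o0 :: rest =>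
      let keep := o0 :: (((o0 :: rest).zip rest).filter
          (fun p => decide (PySem.List.pyGetD vals p.1 "" ≠ PySem.List.pyGetD vals p.2 ""))).map (·.2)
      (PySem.List.sorted keep (fun i => i) false).map (fun i => PySem.List.pyGetD vals i "")

-- ===== PRECONDITION & SPEC =====
def Spec_parse_line_list (raw : Option (List String)) (dedupe : Bool) (out : List String) : Prop := out = parse_line_list_alt raw dedupe
instance (raw : Option (List String)) (dedupe : Bool) (out : List String) : Decidable (Spec_parse_line_list raw dedupe out) := by unfold Spec_parse_line_list; infer_instance

-- ===== CLAIM (what is proved, stated in full; the proofs are below) =====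
def Claim_equal_parse_line_list : Prop := ∀ (raw : Option (List String)) (dedupe : Bool), Dom_parse_line_list raw dedupe → Spec_parse_line_list raw dedupe (parse_line_list raw dedupe)

-- ===== LEMMAS AND PROOFS =====

-- A's inner line-loop step
def pvStep (dedupe : Bool) (st : List String × PySem.Set String) (line : String) :
    List String × PySem.Set String :=
  let value := PySem.Str.strip line
  if value = "" then st
  else if dedupe then
    if PySem.Set.contains st.2 value then st
    else (st.1 ++ [value], PySem.Set.add st.2 value)
  else (st.1 ++ [value], st.2)

-- the step on a value already known non-empty
def pvStepV (dedupe : Bool) (st : List String × PySem.Set String) (value : String) :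
    List String × PySem.Set String :=
  if dedupe then
    if PySem.Set.contains st.2 value then st
    else (st.1 ++ [value], PySem.Set.add st.2 value)
  else (st.1 ++ [value], st.2)

-- first-occurrence filter relative to an already-seen prefix
def pvFF (pre : List String) : List String → List String
  | [] => []
  | v :: vs => if v ∈ pre then pvFF pre vs else v :: pvFF (pre ++ [v]) vs

-- value at an index
def pvKey (vals : List String) (i : Int) : String := PySem.List.pyGetD vals i ""

-- strict (value, position) lexicographic order on index positions
def pvR (vals : List String) (a b : Int) : Prop :=
  pvKey vals a < pvKey vals b ∨ (pvKey vals a = pvKey vals b ∧ a < b)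

-- the comparison sorted2 uses for key (vals[i], i)
def pvBefore (vals : List String) (a b : Int) : Bool :=
  decide (PySem.List.pyGetD vals a "" < PySem.List.pyGetD vals b "") ||
    (!decide (PySem.List.pyGetD vals b "" < PySem.List.pyGetD vals a "") && decide (a < b))

-- "i is the first position holding its value"
def pvP (vals : List String) (i : Int) : Prop :=
  ∀ j, 0 ≤ j → j < i → pvKey vals j ≠ pvKey vals i

def pvFirstB (vals : List String) (i : Int) : Bool :=
  (PySem.List.pyRange 0 i 1).all
    (fun j => !(PySem.List.pyGetD vals j "" == PySem.List.pyGetD vals i ""))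

-- heads of equal-value blocks after a block head a
def pvAdj (vals : List String) : Int → List Int → List Int
  | _, [] => []
  | a, b :: t => (if pvKey vals a ≠ pvKey vals b then [b] else []) ++ pvAdj vals b t

-- A's inner loop over raw lines equals the loop over the gathered values
theorem foldl_step_eq_stepV (dedupe : Bool) (lines : List String)
    (st : List String × PySem.Set String) :
    lines.foldl (pvStep dedupe) st
      = (((lines.map PySem.Str.strip).filter (fun v => v ≠ "")).foldl (pvStepV dedupe) st) := by
  induction lines generalizing st with
  | nil => rfl
  | cons l ls ih =>
    by_cases h : PySem.Str.strip l = "" <;>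
      simp [pvStep, pvStepV, h, ih]

-- dedupe = false: the value loop just appends
theorem foldl_stepV_false (vs : List String) (st : List String × PySem.Set String) :
    vs.foldl (pvStepV false) st = (st.1 ++ vs, st.2) := by
  induction vs generalizing st with
  | nil => simp
  | cons v vs ih => simp [pvStepV, ih]

-- dedupe = true: out and seen stay equal, appending exactly the unseen firsts
theorem foldl_stepV_true (vs : List String) (s : PySem.Set String) :
    vs.foldl (pvStepV true) (s, s) = (s ++ pvFF s vs, s ++ pvFF s vs) := by
  induction vs generalizing s with
  | nil => simp [pvFF]
  | cons v vs ih =>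
    by_cases hm : v ∈ s
    · have h : pvStepV true (s, s) v = (s, s) := by
        simp [pvStepV, hm]
      simp only [List.foldl_cons, h, ih, pvFF, if_pos hm]
    · have h : pvStepV true (s, s) v = (s ++ [v], s ++ [v]) := by
        simp [pvStepV, PySem.Set.add, hm]
      simp only [List.foldl_cons, h, ih (s ++ [v]), pvFF, if_neg hm, List.append_assoc,
        List.singleton_append]

-- pvFF only depends on the membership of the prefix
theorem pvFF_congr (t pre pre' : List String) (h : ∀ x, x ∈ pre ↔ x ∈ pre') :
    pvFF pre t = pvFF pre' t := by
  induction t generalizing pre pre' with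
  | nil => rfl
  | cons v vs ih =>
    simp only [pvFF]
    by_cases hv : v ∈ pre
    · rw [if_pos hv, if_pos ((h v).1 hv)]
      exact ih pre pre' h
    · rw [if_neg hv, if_neg (fun hh => hv ((h v).2 hh))]
      exact congrArg _ (ih (pre ++ [v]) (pre' ++ [v]) (by intro x; simp [h x]))

-- insertBy one-step equations
theorem insertBy_nil (before : Int → Int → Bool) (x : Int) :
    PySem.List.insertBy before x ([] : List Int) = [x] := by
  simp [PySem.List.insertBy]

theorem insertBy_cons (before : Int → Int → Bool) (x y : Int) (ys : List Int) :
    PySem.List.insertBy before x (y :: ys)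
      = if before x y then x :: y :: ys else y :: PySem.List.insertBy before x ys := by
  simp [PySem.List.insertBy]

-- pvBefore decides pvR (forward), and its negation decides the reverse off the diagonal
theorem pvR_of_before (vals : List String) (a b : Int) (h : pvBefore vals a b = true) :
    pvR vals a b := by
  simp only [pvBefore, Bool.or_eq_true, Bool.and_eq_true, Bool.not_eq_true', decide_eq_true_eq,
    decide_eq_false_iff_not] at h
  rcases h with h | ⟨h1, h2⟩
  · exact Or.inl h
  · rcases lt_or_eq_of_le (not_lt.1 h1) with hlt | heq
    · exact Or.inl hlt
    · exact Or.inr ⟨heq, h2⟩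

theorem pvR_of_not_before (vals : List String) (a b : Int) (h : pvBefore vals a b = false)
    (hne : a ≠ b) : pvR vals b a := by
  simp only [pvBefore, Bool.or_eq_false_iff, Bool.and_eq_false_iff, Bool.not_eq_false',
    decide_eq_true_eq, decide_eq_false_iff_not] at h
  obtain ⟨h1, h2⟩ := h
  rcases h2 with h2 | h2
  · exact Or.inl h2
  · rcases lt_or_eq_of_le (not_lt.1 h1) with hlt | heq
    · exact Or.inl hlt
    · exact Or.inr ⟨by simpa [pvKey] using heq, by omega⟩

theorem pvR_trans (vals : List String) (a b c : Int) (h1 : pvR vals a b) (h2 : pvR vals b c) :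
    pvR vals a c := by
  rcases h1 with h1 | ⟨h1e, h1l⟩ <;> rcases h2 with h2 | ⟨h2e, h2l⟩
  · exact Or.inl (lt_trans h1 h2)
  · exact Or.inl (h2e ▸ h1)
  · exact Or.inl (h1e ▸ h2)
  · exact Or.inr ⟨h1e.trans h2e, by omega⟩

-- inserting a fresh element keeps the list pvR-pairwise
theorem pairwise_insertBy_pvR (vals : List String) (x : Int) (ys : List Int)
    (hx : x ∉ ys) (hp : ys.Pairwise (pvR vals)) :
    (PySem.List.insertBy (pvBefore vals) x ys).Pairwise (pvR vals) := by
  induction ys with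
  | nil => simp [insertBy_nil]
  | cons y ys ih =>
    rw [insertBy_cons]
    rcases List.pairwise_cons.1 hp with ⟨hy, hys⟩
    by_cases hb : pvBefore vals x y = true
    · rw [if_pos hb]
      refine List.pairwise_cons.2 ⟨?_, hp⟩
      intro z hz
      rcases List.mem_cons.1 hz with rfl | hz
      · exact pvR_of_before vals x z hb
      · exact pvR_trans vals x y z (pvR_of_before vals x y hb) (hy z hz)
    · rw [if_neg hb]
      refine List.pairwise_cons.2 ⟨?_, ih (fun hx' => hx (List.mem_cons_of_mem y hx')) hys⟩
      intro z hz
      rcases (PySem.List.mem_insertBy _ x z ys).1 hz with heq | hz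
      · have hxy : x ≠ y := fun he => hx (by rw [he]; exact List.mem_cons_self)
        rw [heq]
        exact pvR_of_not_before vals x y (by simpa using hb) hxy
      · exact hy z hz

-- the insertion-sort fold keeps the accumulator pvR-pairwise
theorem pairwise_foldl_insertBy_pvR (vals : List String) (xs : List Int) :
    ∀ (acc : List Int), xs.Nodup → (∀ x ∈ xs, x ∉ acc) → acc.Pairwise (pvR vals) →
    (xs.foldl (fun acc x => PySem.List.insertBy (pvBefore vals) x acc) acc).Pairwise (pvR vals) := by
  induction xs with
  | nil => intro acc _ _ h; exact h
  | cons x xs ih =>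
    intro acc hnd hdisj hacc
    simp only [List.foldl_cons]
    refine ih _ (List.nodup_cons.1 hnd).2 ?_ ?_
    · intro y hy hmem
      rcases (PySem.List.mem_insertBy _ x y acc).1 hmem with rfl | hmem
      · exact (List.nodup_cons.1 hnd).1 hy
      · exact hdisj y (List.mem_cons_of_mem x hy) hmem
    · exact pairwise_insertBy_pvR vals x acc (hdisj x (List.mem_cons_self)) hacc

-- sorted2 with key (vals[i], i) is the insertBy fold with pvBefore
theorem sorted2_eq_foldl (vals : List String) (xs : List Int) :
    PySem.List.sorted2 xs (fun i => PySem.List.pyGetD vals i "") (fun i => i) false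
      = xs.foldl (fun acc x => PySem.List.insertBy (pvBefore vals) x acc) [] := rfl

-- the port's zip-and-filter pass computes pvAdj
theorem zip_filter_eq_pvAdj (vals : List String) (a : Int) (rest : List Int) :
    (((a :: rest).zip rest).filter
        (fun p => decide (PySem.List.pyGetD vals p.1 "" ≠ PySem.List.pyGetD vals p.2 ""))).map
      (·.2) = pvAdj vals a rest := by
  induction rest generalizing a with
  | nil => rfl
  | cons b t ih =>
    show ((((a, b) :: (b :: t).zip t).filter _).map _) = _
    rw [List.filter_cons]
    by_cases h : pvKey vals a ≠ pvKey vals b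
    · rw [if_pos (by simpa [pvKey] using h)]
      simp only [List.map_cons, pvAdj, if_pos h, List.singleton_append]
      rw [ih b]
    · rw [if_neg (by simpa [pvKey] using h)]
      simp only [pvAdj, if_neg h, List.nil_append]
      exact ih b

theorem pvAdj_sublist (vals : List String) (rest : List Int) :
    ∀ a, (pvAdj vals a rest).Sublist rest := by
  induction rest with
  | nil => intro a; simp [pvAdj]
  | cons b t ih =>
    intro a
    simp only [pvAdj]
    by_cases h : pvKey vals a ≠ pvKey vals b
    · rw [if_pos h]
      exact List.Sublist.cons₂ b (ih b)
    · rw [if_neg h]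
      exact List.Sublist.cons b (ih b)

-- block heads after the global head are exactly the non-head first occurrences
theorem pvAdj_mem (vals : List String) (n : Int) (rest : List Int) :
    ∀ (a : Int), (a :: rest).Pairwise (pvR vals) → (a :: rest).Nodup →
    (∀ x ∈ a :: rest, 0 ≤ x ∧ x < n) →
    (∀ j, 0 ≤ j → j < n → j ∉ a :: rest → pvR vals j a) →
    ∀ i, (i ∈ pvAdj vals a rest ↔ i ∈ rest ∧ pvP vals i) := by
  induction rest with
  | nil => intro a _ _ _ _ i; simp [pvAdj]
  | cons b t ih =>
    intro a hp hnd hb hpre i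
    have hRab : pvR vals a b := (List.pairwise_cons.1 hp).1 b (List.mem_cons_self)
    have hpt : (b :: t).Pairwise (pvR vals) := (List.pairwise_cons.1 hp).2
    have hnt : (b :: t).Nodup := (List.nodup_cons.1 hnd).2
    have hbt : ∀ x ∈ b :: t, 0 ≤ x ∧ x < n := fun x hx => hb x (List.mem_cons_of_mem a hx)
    have hpre' : ∀ j, 0 ≤ j → j < n → j ∉ b :: t → pvR vals j b := by
      intro j h0 hj hnot
      by_cases hja : j = a
      · exact hja ▸ hRab
      · have : j ∉ a :: b :: t := by
          intro hm
          rcases List.mem_cons.1 hm with h | h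
          · exact hja h
          · exact hnot h
        exact pvR_trans vals j a b (hpre j h0 hj this) hRab
    have hIH := ih b hpt hnt hbt hpre'
    have hbn : b < n := (hb b (List.mem_cons_of_mem a (List.mem_cons_self))).2
    have han : 0 ≤ a := (hb a (List.mem_cons_self)).1
    by_cases hkab : pvKey vals a ≠ pvKey vals b
    · -- b starts a new block: b is a first occurrence
      have hPb : pvP vals b := by
        intro j h0 hj he
        have hjn : j < n := lt_trans hj hbn
        by_cases hjmem : j ∈ a :: b :: t
        · rcases List.mem_cons.1 hjmem with h | h
          · exact hkab (h ▸ he)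
          · rcases List.mem_cons.1 h with h | h
            · omega
            · rcases (List.pairwise_cons.1 hpt).1 j h with hlt | ⟨_, hlt⟩
              · exact absurd (he ▸ hlt) (lt_irrefl _)
              · omega
        · have hja := hpre j h0 hjn hjmem
          have h1 : pvKey vals j ≤ pvKey vals a := by
            rcases hja with h | ⟨h, _⟩
            · exact le_of_lt h
            · exact le_of_eq h
          have h2 : pvKey vals a ≤ pvKey vals b := by
            rcases hRab with h | ⟨h, _⟩
            · exact le_of_lt h
            · exact le_of_eq h
          exact hkab (le_antisymm h2 (he ▸ h1))
      simp only [pvAdj, if_pos hkab, List.singleton_append, List.mem_cons, hIH]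
      constructor
      · rintro (rfl | ⟨hm, hP⟩)
        · exact ⟨Or.inl rfl, hPb⟩
        · exact ⟨Or.inr hm, hP⟩
      · rintro ⟨rfl | hm, hP⟩
        · exact Or.inl rfl
        · exact Or.inr ⟨hm, hP⟩
    · -- same value as its predecessor: b is not a first occurrence
      have hke : pvKey vals a = pvKey vals b := not_not.1 (fun h => hkab h)
      have hab : a < b := by
        rcases hRab with h | ⟨_, h⟩
        · exact absurd (hke ▸ h) (lt_irrefl _)
        · exact h
      have hPb : ¬ pvP vals b := fun hP => hP a han hab hke
      simp only [pvAdj, if_neg hkab, List.nil_append, hIH, List.mem_cons]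
      constructor
      · rintro ⟨hm, hP⟩
        exact ⟨Or.inr hm, hP⟩
      · rintro ⟨rfl | hm, hP⟩
        · exact absurd hP hPb
        · exact ⟨hm, hP⟩

-- the global head is a first occurrence
theorem pvP_head (vals : List String) (n : Int) (o0 : Int) (rest : List Int)
    (hp : (o0 :: rest).Pairwise (pvR vals))
    (hb : ∀ x ∈ o0 :: rest, 0 ≤ x ∧ x < n)
    (hall : ∀ x, 0 ≤ x → x < n → x ∈ o0 :: rest) :
    pvP vals o0 := by
  intro j h0 hj he
  have hb0 := hb o0 (List.mem_cons_self)
  have hjm : j ∈ o0 :: rest := hall j h0 (lt_trans hj hb0.2)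
  have hjr : j ∈ rest := by
    rcases List.mem_cons.1 hjm with heq | h
    · omega
    · exact h
  have hR : pvR vals o0 j := (List.pairwise_cons.1 hp).1 j hjr
  rcases hR with h | ⟨h, hlt⟩
  · exact absurd (he ▸ h) (lt_irrefl _)
  · omega

theorem pvFirstB_iff (vals : List String) (i : Int) :
    pvFirstB vals i = true ↔ pvP vals i := by
  simp only [pvFirstB, List.all_eq_true, PySem.List.mem_pyRange_one, pvP, pvKey,
    Bool.not_eq_true', beq_eq_false_iff_ne, ne_eq]
  constructor
  · intro h j h0 hj
    exact h j ⟨h0, hj⟩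
  · intro h j ⟨h0, hj⟩
    exact h j h0 hj

theorem pvKey_append_left (pre t : List String) (k : Nat) (hk : k < pre.length) :
    pvKey (pre ++ t) (k : Int) = pre[k] := by
  rw [pvKey, PySem.List.pyGetD_natCast, List.getD_eq_getElem?_getD,
    List.getElem?_append_left hk, List.getElem?_eq_getElem hk, Option.getD_some]

theorem pvKey_append_self (pre t : List String) (v : String) :
    pvKey (pre ++ v :: t) (pre.length : Int) = v := by
  rw [pvKey, PySem.List.pyGetD_natCast, List.getD_eq_getElem?_getD,
    List.getElem?_append_right (le_refl pre.length)]
  simp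

theorem pvFirstB_head (pre t : List String) (v : String) :
    (pvFirstB (pre ++ v :: t) (pre.length : Int) = true) ↔ v ∉ pre := by
  rw [pvFirstB_iff]
  have hv : pvKey (pre ++ v :: t) (pre.length : Int) = v := pvKey_append_self pre t v
  constructor
  · intro h hvp
    obtain ⟨k, hk, hkv⟩ := List.mem_iff_getElem.1 hvp
    have hkey : pvKey (pre ++ v :: t) (k : Int) = v := by
      rw [pvKey_append_left pre (v :: t) k hk, hkv]
    exact h (k : Int) (by positivity) (by exact_mod_cast hk) (by rw [hkey, hv])
  · intro h j h0 hj he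
    obtain ⟨k, rfl⟩ := Int.eq_ofNat_of_zero_le h0
    have hk : k < pre.length := by exact_mod_cast hj
    apply h
    have hpk : pre[k] = v := by rw [← pvKey_append_left pre (v :: t) k hk, he, hv]
    exact hpk ▸ List.getElem_mem hk

-- reading the first-occurrence positions back in index order yields pvFF
theorem filter_first_map_eq_pvFF (t : List String) :
    ∀ (pre : List String),
    ((PySem.List.pyRange (pre.length : Int) ((pre.length : Int) + (t.length : Int)) 1).filter
        (pvFirstB (pre ++ t))).map (fun i => PySem.List.pyGetD (pre ++ t) i "") = pvFF pre t := by
  induction t with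
  | nil =>
    intro pre
    simp [pvFF]
  | cons v t ih =>
    intro pre
    have hlt : (pre.length : Int) < (pre.length : Int) + ((v :: t).length : Int) := by
      simp only [List.length_cons]
      push_cast
      omega
    rw [PySem.List.pyRange_one_cons hlt, List.filter_cons]
    have hv : PySem.List.pyGetD (pre ++ v :: t) ((pre.length : Int)) "" = v :=
      pvKey_append_self pre t v
    have hrange : PySem.List.pyRange ((pre.length : Int) + 1)
          ((pre.length : Int) + ((v :: t).length : Int)) 1
        = PySem.List.pyRange (((pre ++ [v]).length : Int))
          (((pre ++ [v]).length : Int) + (t.length : Int)) 1 := by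
      congr 1 <;> (simp only [List.length_append, List.length_cons, List.length_nil]; push_cast; omega)
    have hlist : pre ++ v :: t = (pre ++ [v]) ++ t := by simp
    by_cases hvp : v ∈ pre
    · rw [if_neg (fun htr => ((pvFirstB_head pre t v).1 htr) hvp)]
      rw [hrange, hlist, ih (pre ++ [v])]
      simp only [pvFF, if_pos hvp]
      exact pvFF_congr t (pre ++ [v]) pre (by intro x; simp; intro hx; subst hx; exact hvp)
    · rw [if_pos ((pvFirstB_head pre t v).2 hvp)]
      simp only [List.map_cons, hv]
      rw [hrange, hlist, ih (pre ++ [v])]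
      simp only [pvFF, if_neg hvp]

-- the dedupe branch of B, as a named term for the proofs
def pvBody (vals : List String) : List String :=
  match PySem.List.sorted2 (PySem.List.pyRange 0 (vals.length : Int) 1)
      (fun i => PySem.List.pyGetD vals i "") (fun i => i) false with
  | [] => []
  | o0 :: rest =>
    (PySem.List.sorted (o0 :: (((o0 :: rest).zip rest).filter
        (fun p => decide (PySem.List.pyGetD vals p.1 "" ≠ PySem.List.pyGetD vals p.2 ""))).map (·.2))
      (fun i => i) false).map (fun i => PySem.List.pyGetD vals i "")

theorem alt_eq (raw : Option (List String)) (dedupe : Bool) :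
    parse_line_list_alt raw dedupe
      = (if dedupe = false ∨ ((pvChunks raw).map pvVals).flatMap (fun p => p) = []
         then ((pvChunks raw).map pvVals).flatMap (fun p => p)
         else pvBody (((pvChunks raw).map pvVals).flatMap (fun p => p))) := rfl

theorem pvBody_eq (vals : List String) (hnil : vals ≠ []) : pvBody vals = pvFF [] vals := by
  set n : Int := (vals.length : Int) with hn
  set xs := PySem.List.pyRange 0 n 1 with hxs
  have hxsnd : xs.Nodup := PySem.List.nodup_pyRange_one 0 n
  have Hperm : (PySem.List.sorted2 xs (fun i => PySem.List.pyGetD vals i "") (fun i => i)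
      false).Perm xs := PySem.List.sorted2_perm xs _ _ false
  have Hpair0 : (PySem.List.sorted2 xs (fun i => PySem.List.pyGetD vals i "") (fun i => i)
      false).Pairwise (pvR vals) := by
    rw [sorted2_eq_foldl]
    exact pairwise_foldl_insertBy_pvR vals xs [] hxsnd
      (by intro x _ hx; exact absurd hx (List.not_mem_nil))
      List.Pairwise.nil
  rcases horder : (PySem.List.sorted2 xs (fun i => PySem.List.pyGetD vals i "") (fun i => i)
      false) with _ | ⟨o0, rest⟩
  · exfalso
    rw [horder] at Hperm
    have hxnil : xs = [] := Hperm.symm.eq_nil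
    have hpos : (0 : Int) < n := by
      rw [hn]
      have := List.length_pos_iff.2 hnil
      omega
    rw [hxs, PySem.List.pyRange_one_cons hpos] at hxnil
    exact List.cons_ne_nil _ _ hxnil
  · rw [horder] at Hperm Hpair0
    simp only [pvBody, ← hn, ← hxs, horder]
    have Hmem : ∀ x, x ∈ o0 :: rest ↔ (0 ≤ x ∧ x < n) := by
      intro x
      rw [Hperm.mem_iff, hxs, PySem.List.mem_pyRange_one]
    have Hnd : (o0 :: rest).Nodup := Hperm.symm.nodup hxsnd
    have Hb : ∀ x ∈ o0 :: rest, 0 ≤ x ∧ x < n := fun x hx => (Hmem x).1 hx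
    have Hall : ∀ x, 0 ≤ x → x < n → x ∈ o0 :: rest := fun x h0 h1 => (Hmem x).2 ⟨h0, h1⟩
    have Hpre : ∀ j, 0 ≤ j → j < n → j ∉ o0 :: rest → pvR vals j o0 := by
      intro j h0 h1 hnot
      exact absurd (Hall j h0 h1) hnot
    have Hadj := pvAdj_mem vals n rest o0 Hpair0 Hnd Hb Hpre
    have Hhead : pvP vals o0 := pvP_head vals n o0 rest Hpair0 Hb Hall
    have Hkm : ∀ i, i ∈ o0 :: pvAdj vals o0 rest ↔ (0 ≤ i ∧ i < n ∧ pvP vals i) := by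
      intro i
      rw [List.mem_cons, Hadj i]
      constructor
      · rintro (rfl | ⟨hm, hP⟩)
        · exact ⟨(Hb i (List.mem_cons_self)).1, (Hb i (List.mem_cons_self)).2, Hhead⟩
        · have hb := Hb i (List.mem_cons_of_mem o0 hm)
          exact ⟨hb.1, hb.2, hP⟩
      · rintro ⟨h0, h1, hP⟩
        rcases List.mem_cons.1 (Hall i h0 h1) with rfl | hm
        · exact Or.inl rfl
        · exact Or.inr ⟨hm, hP⟩
    have Hknd : (o0 :: pvAdj vals o0 rest).Nodup := by
      rw [List.nodup_cons]
      refine ⟨fun hm => (List.nodup_cons.1 Hnd).1 ((pvAdj_sublist vals rest o0).subset hm), ?_⟩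
      exact (List.nodup_cons.1 Hnd).2.sublist (pvAdj_sublist vals rest o0)
    rw [zip_filter_eq_pvAdj vals o0 rest]
    have Hsorted : PySem.List.sorted (o0 :: pvAdj vals o0 rest) (fun i => i) false
        = xs.filter (pvFirstB vals) := by
      apply PySem.List.sorted_eq_of_perm_of_pairwise_lt
      · rw [List.perm_ext_iff_of_nodup (hxsnd.filter _) Hknd]
        intro a
        rw [List.mem_filter, Hkm a, hxs, PySem.List.mem_pyRange_one, pvFirstB_iff]
        tauto
      · exact ((by rw [hxs]; exact PySem.List.pairwise_lt_pyRange_one 0 n) :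
          xs.Pairwise (· < ·)).filter _
    rw [Hsorted]
    have hfin := filter_first_map_eq_pvFF vals []
    simp only [List.length_nil, Int.natCast_zero, zero_add, List.nil_append] at hfin
    rw [hxs, hn]
    exact hfin

theorem parse_line_list_spec : Claim_equal_parse_line_list := by
  intro raw dedupe _
  show parse_line_list raw dedupe = parse_line_list_alt raw dedupe
  have houter : ∀ (chunks : List String) (st : List String × PySem.Set String),
      chunks.foldl (fun st chunk =>
        (((PySem.Str.split? (PySem.Str.replace chunk "\r" "\n") "\n").getD [])).foldl (pvStep dedupe) st) st
      = ((chunks.map pvVals).flatMap (fun p => p)).foldl (pvStepV dedupe) st := by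
    intro chunks
    induction chunks with
    | nil => intro st; rfl
    | cons c cs ih =>
      intro st
      simp only [List.foldl_cons, List.map_cons, List.flatMap_cons, List.foldl_append]
      rw [ih, foldl_step_eq_stepV]
      rfl
  have hA : parse_line_list raw dedupe
      = ((((pvChunks raw).map pvVals).flatMap (fun p => p)).foldl (pvStepV dedupe)
          (([] : List String), (PySem.Set.empty : PySem.Set String))).1 := by
    show ((pvChunks raw).foldl (fun (st : List String × PySem.Set String) chunk =>
        (((PySem.Str.split? (PySem.Str.replace chunk "\r" "\n") "\n").getD [])).foldl (pvStep dedupe) st)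
        (([] : List String), (PySem.Set.empty : PySem.Set String))).1 = _
    rw [houter]
  rw [alt_eq]
  set vals := ((pvChunks raw).map pvVals).flatMap (fun p => p) with hvals
  cases dedupe with
  | false =>
    rw [hA, foldl_stepV_false, if_pos (Or.inl rfl)]
    simp
  | true =>
    have hE : (PySem.Set.empty : PySem.Set String) = ([] : List String) := rfl
    rw [hA, hE, foldl_stepV_true vals [], List.nil_append]
    by_cases hnil : vals = []
    · rw [if_pos (Or.inr hnil), hnil]
      rfl
    · rw [if_neg (fun hor => hor.elim (fun h => absurd h (by decide)) (fun h => hnil h))]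
      exact (pvBody_eq vals hnil).symm
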